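-- pv_equiv track=rewrite | github.com/kqsavell/cs4341Gomoku | mainclone.py | get_horizontal_heuristic
-- ===== SOURCE A (Python) =====
-- def get_horizontal_heuristic(board, value):
--     heuristic_value = 0
--     for row in board:
--         for start in range(0, len(row)- 5):
--             friendly_count = 0
--             enemy_count = 0
--             for i in range(5):
--                 if row[start + i] == value:
--                     friendly_count += 1
--                 elif row[start + i] == 0:
--                     friendly_count += 0
--                 else:
--                     enemy_count += 1
--             if friendly_count > enemy_count:
--                 heuristic_value += 1
--             else:
--                 heuristic_value -= 1
--     return heuristic_value
-- ===== SOURCE B (Python) =====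
-- def get_horizontal_heuristic(board, value):
--     total = 0
--     for row in board:
--         # prefix counts: pf[j] = friendly cells in row[:j], pe[j] = enemy cells in row[:j]
--         pf = [0]
--         pe = [0]
--         for c in row:
--             pf.append(pf[-1] + (1 if c == value else 0))
--             pe.append(pe[-1] + (1 if c != value and c != 0 else 0))
--         for start in range(0, len(row) - 5):
--             f = pf[start + 5] - pf[start]
--             e = pe[start + 5] - pe[start]
--             total += 1 if f > e else -1
--     return total
-- ===== Notes on version B (the rewrite author's own statement) =====
-- stated objective: faster
-- what changed: Replaces the per-window inner 5-element scan with per-row prefix-count arrays, so each window's friendly/enemy counts are two O(1) subtractions instead of a rescan.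
import Mathlib
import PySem

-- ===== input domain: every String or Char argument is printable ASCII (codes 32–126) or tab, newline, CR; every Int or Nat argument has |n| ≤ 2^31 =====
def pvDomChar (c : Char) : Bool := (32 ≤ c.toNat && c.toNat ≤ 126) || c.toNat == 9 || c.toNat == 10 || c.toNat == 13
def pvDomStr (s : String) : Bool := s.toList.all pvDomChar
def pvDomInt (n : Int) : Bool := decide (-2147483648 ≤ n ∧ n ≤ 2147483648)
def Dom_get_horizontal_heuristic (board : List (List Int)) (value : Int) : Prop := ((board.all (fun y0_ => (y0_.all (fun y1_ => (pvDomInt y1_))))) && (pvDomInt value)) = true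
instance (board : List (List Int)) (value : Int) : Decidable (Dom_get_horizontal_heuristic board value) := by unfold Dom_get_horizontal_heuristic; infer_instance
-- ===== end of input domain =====

-- B replaces A's per-window 5-element rescan with per-row prefix-count lists (two O(1)
-- subtractions per window); objective: faster by a constant factor.

-- ===== PORT A =====
def get_horizontal_heuristic (board : List (List Int)) (value : Int) : Int :=
  board.foldl (fun hv row =>
    (PySem.List.pyRange 0 ((row.length : Int) - 5) 1).foldl (fun hv start =>
      let fe := (PySem.List.pyRange 0 5 1).foldl (fun (p : Int × Int) i =>
        let c := PySem.List.pyGetD row (start + i) 0   -- index always in range here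
        if c = value then (p.1 + 1, p.2)
        else if c = 0 then (p.1 + 0, p.2)
        else (p.1, p.2 + 1)) (0, 0)
      if fe.1 > fe.2 then hv + 1 else hv - 1) hv) 0

-- ===== PORT B =====
def get_horizontal_heuristic_alt (board : List (List Int)) (value : Int) : Int :=
  board.foldl (fun total row =>
    let pp := row.foldl (fun (p : List Int × List Int) c =>
      (p.1 ++ [PySem.List.pyGetD p.1 (-1) 0 + (if c = value then 1 else 0)],
       p.2 ++ [PySem.List.pyGetD p.2 (-1) 0 + (if c ≠ value ∧ c ≠ 0 then 1 else 0)]))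
      ([0], [0])
    (PySem.List.pyRange 0 ((row.length : Int) - 5) 1).foldl (fun total start =>
      let f := PySem.List.pyGetD pp.1 (start + 5) 0 - PySem.List.pyGetD pp.1 start 0
      let e := PySem.List.pyGetD pp.2 (start + 5) 0 - PySem.List.pyGetD pp.2 start 0
      total + (if f > e then 1 else -1)) total) 0

-- ===== PRECONDITION & SPEC =====
def Spec_get_horizontal_heuristic (board : List (List Int)) (value : Int) (out : Int) : Prop := out = get_horizontal_heuristic_alt board value
instance (board : List (List Int)) (value : Int) (out : Int) : Decidable (Spec_get_horizontal_heuristic board value out) := by unfold Spec_get_horizontal_heuristic; infer_instance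

-- ===== CLAIM (what is proved, stated in full; the proofs are below) =====
def Claim_equal_get_horizontal_heuristic : Prop := ∀ (board : List (List Int)) (value : Int), Dom_get_horizontal_heuristic board value → Spec_get_horizontal_heuristic board value (get_horizontal_heuristic board value)

-- ===== LEMMAS AND PROOFS =====

-- friendly / enemy indicator of a cell
def pvIndF (value c : Int) : Int := if c = value then 1 else 0
def pvIndE (value c : Int) : Int := if c ≠ value ∧ c ≠ 0 then 1 else 0

-- running partial sums of g over a list, starting from s (one entry per element)
def pvPsums (g : Int → Int) (s : Int) : List Int → List Int
  | [] => []
  | c :: cs => (s + g c) :: pvPsums g (s + g c) cs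

-- sum of g over the first j cells
def pvS (g : Int → Int) (row : List Int) (j : Nat) : Int := ((row.take j).map g).sum

theorem pv_foldl_psums (g : Int → Int) (row : List Int) :
    ∀ (acc : List Int) (x : Int),
      row.foldl (fun acc c => acc ++ [PySem.List.pyGetD acc (-1) 0 + g c]) (acc ++ [x])
        = (acc ++ [x]) ++ pvPsums g x row := by
  induction row with
  | nil => intro acc x; simp [pvPsums]
  | cons c cs ih =>
    intro acc x
    simp only [List.foldl_cons, PySem.List.pyGetD_neg_one_append_singleton, pvPsums]
    have := ih (acc ++ [x]) (x + g c)
    simpa using this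

theorem pvPsums_getD (g : Int → Int) (row : List Int) :
    ∀ (s : Int) (j : Nat), j < row.length →
      (pvPsums g s row).getD j 0 = s + pvS g row (j + 1) := by
  induction row with
  | nil => intro s j h; simp at h
  | cons c cs ih =>
    intro s j h
    cases j with
    | zero => simp [pvPsums, pvS]
    | succ k =>
      have hk : k < cs.length := by simpa using h
      simp only [pvPsums, List.getD_cons_succ, ih (s + g c) k hk, pvS, List.take_succ_cons]
      simp [add_assoc]

theorem pv_pl_getD (g : Int → Int) (row : List Int) (j : Nat) (h : j ≤ row.length) :
    (0 :: pvPsums g 0 row).getD j 0 = pvS g row j := by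
  cases j with
  | zero => simp [pvS]
  | succ k =>
    have hk : k < row.length := by omega
    rw [List.getD_cons_succ, pvPsums_getD g row 0 k hk]
    omega

theorem pvS_succ (g : Int → Int) (row : List Int) (j : Nat) (h : j < row.length) :
    pvS g row (j + 1) = pvS g row j + g row[j] := by
  unfold pvS
  rw [List.take_add_one, List.getElem?_eq_getElem h, Option.toList_some, List.map_append,
    List.sum_append]
  simp

-- equality of one row's contribution
theorem pvWinGen (row : List Int) (value : Int) (s : Nat) :
    ∀ (n : Nat), s + n ≤ row.length →
    (PySem.List.pyRange 0 (n : Int) 1).foldl (fun (p : Int × Int) i =>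
        let c := PySem.List.pyGetD row ((s : Int) + i) 0
        if c = value then (p.1 + 1, p.2)
        else if c = 0 then (p.1 + 0, p.2)
        else (p.1, p.2 + 1)) (0, 0)
      = (pvS (fun c => if c = value then 1 else 0) row (s + n)
           - pvS (fun c => if c = value then 1 else 0) row s,
         pvS (fun c => if c ≠ value ∧ c ≠ 0 then 1 else 0) row (s + n)
           - pvS (fun c => if c ≠ value ∧ c ≠ 0 then 1 else 0) row s) := by
  intro n
  induction n with
  | zero => intro _; simp [PySem.List.pyRange_one_eq_nil]
  | succ n ih =>
    intro h
    have hn : s + n ≤ row.length := by omega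
    have hlt : s + n < row.length := by omega
    have hcast : ((n + 1 : Nat) : Int) = (n : Int) + 1 := by push_cast; ring
    rw [hcast, PySem.List.pyRange_one_succ_right (Int.natCast_nonneg n), List.foldl_append,
      ih hn]
    simp only [List.foldl_cons, List.foldl_nil]
    have hget : PySem.List.pyGetD row ((s : Int) + (n : Int)) 0 = row[s + n]'hlt := by
      have hc : ((s : Int) + (n : Int)) = ((s + n : Nat) : Int) := by push_cast; ring
      rw [hc, PySem.List.pyGetD_natCast, List.getD_eq_getElem]
    have hS1 := pvS_succ (fun c => if c = value then 1 else 0) row (s + n) hlt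
    have hS2 := pvS_succ (fun c => if c ≠ value ∧ c ≠ 0 then 1 else 0) row (s + n) hlt
    have hidx : s + (n + 1) = (s + n) + 1 := by omega
    rw [hidx, hS1, hS2]
    simp only [hget]
    split_ifs <;>
      first
        | (exfalso ; tauto)
        | (simp only [Prod.mk.injEq] ; exact ⟨by ring, by ring⟩)

theorem pv_pp_char (value : Int) (row : List Int) :
    row.foldl (fun (p : List Int × List Int) c =>
      (p.1 ++ [PySem.List.pyGetD p.1 (-1) 0 + (if c = value then 1 else 0)],
       p.2 ++ [PySem.List.pyGetD p.2 (-1) 0 + (if c ≠ value ∧ c ≠ 0 then 1 else 0)]))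
      ([0], [0])
    = (0 :: pvPsums (fun c => if c = value then 1 else 0) 0 row,
       0 :: pvPsums (fun c => if c ≠ value ∧ c ≠ 0 then 1 else 0) 0 row) := by
  rw [PySem.List.foldl_prod_mk
    (f := fun acc c => acc ++ [PySem.List.pyGetD acc (-1) 0 + (if c = value then 1 else 0)])
    (g := fun acc c => acc ++ [PySem.List.pyGetD acc (-1) 0 + (if c ≠ value ∧ c ≠ 0 then 1 else 0)])]
  have h1 := pv_foldl_psums (fun c => if c = value then 1 else 0) row [] 0
  have h2 := pv_foldl_psums (fun c => if c ≠ value ∧ c ≠ 0 then 1 else 0) row [] 0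
  simp only [List.nil_append] at h1 h2
  rw [h1, h2]
  rfl

theorem pv_row_eq (value : Int) (row : List Int) (hv : Int) :
    (PySem.List.pyRange 0 ((row.length : Int) - 5) 1).foldl (fun hv start =>
      let fe := (PySem.List.pyRange 0 5 1).foldl (fun (p : Int × Int) i =>
        let c := PySem.List.pyGetD row (start + i) 0   -- index always in range here
        if c = value then (p.1 + 1, p.2)
        else if c = 0 then (p.1 + 0, p.2)
        else (p.1, p.2 + 1)) (0, 0)
      if fe.1 > fe.2 then hv + 1 else hv - 1) hv
    =
    (let pp := row.foldl (fun (p : List Int × List Int) c =>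
      (p.1 ++ [PySem.List.pyGetD p.1 (-1) 0 + (if c = value then 1 else 0)],
       p.2 ++ [PySem.List.pyGetD p.2 (-1) 0 + (if c ≠ value ∧ c ≠ 0 then 1 else 0)]))
      ([0], [0])
    (PySem.List.pyRange 0 ((row.length : Int) - 5) 1).foldl (fun total start =>
      let f := PySem.List.pyGetD pp.1 (start + 5) 0 - PySem.List.pyGetD pp.1 start 0
      let e := PySem.List.pyGetD pp.2 (start + 5) 0 - PySem.List.pyGetD pp.2 start 0
      total + (if f > e then 1 else -1)) hv) := by
  simp only [pv_pp_char]
  refine PySem.List.foldl_congr_mem _ _ _ _ ?_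
  intro hv start hmem
  rw [PySem.List.mem_pyRange_one] at hmem
  obtain ⟨s, rfl⟩ := Int.eq_ofNat_of_zero_le hmem.1
  have hlen : s + 5 ≤ row.length := by omega
  have hA : (PySem.List.pyRange 0 5 1).foldl (fun (p : Int × Int) i =>
        let c := PySem.List.pyGetD row ((s : Int) + i) 0
        if c = value then (p.1 + 1, p.2)
        else if c = 0 then (p.1 + 0, p.2)
        else (p.1, p.2 + 1)) (0, 0)
      = (pvS (fun c => if c = value then 1 else 0) row (s + 5)
           - pvS (fun c => if c = value then 1 else 0) row s,
         pvS (fun c => if c ≠ value ∧ c ≠ 0 then 1 else 0) row (s + 5)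
           - pvS (fun c => if c ≠ value ∧ c ≠ 0 then 1 else 0) row s) := by
    have := pvWinGen row value s 5 hlen
    norm_num at this ⊢
    exact this
  have hB1 : PySem.List.pyGetD (0 :: pvPsums (fun c => if c = value then 1 else 0) 0 row)
      ((s : Int) + 5) 0 = pvS (fun c => if c = value then 1 else 0) row (s + 5) := by
    rw [show ((s : Int) + 5) = ((s + 5 : Nat) : Int) by push_cast; ring,
      PySem.List.pyGetD_natCast]
    exact pv_pl_getD _ _ _ (by omega)
  have hB2 : PySem.List.pyGetD (0 :: pvPsums (fun c => if c = value then 1 else 0) 0 row)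
      ((s : Int)) 0 = pvS (fun c => if c = value then 1 else 0) row s := by
    rw [PySem.List.pyGetD_natCast]
    exact pv_pl_getD _ _ _ (by omega)
  have hB3 : PySem.List.pyGetD (0 :: pvPsums (fun c => if c ≠ value ∧ c ≠ 0 then 1 else 0) 0 row)
      ((s : Int) + 5) 0 = pvS (fun c => if c ≠ value ∧ c ≠ 0 then 1 else 0) row (s + 5) := by
    rw [show ((s : Int) + 5) = ((s + 5 : Nat) : Int) by push_cast; ring,
      PySem.List.pyGetD_natCast]
    exact pv_pl_getD _ _ _ (by omega)
  have hB4 : PySem.List.pyGetD (0 :: pvPsums (fun c => if c ≠ value ∧ c ≠ 0 then 1 else 0) 0 row)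
      ((s : Int)) 0 = pvS (fun c => if c ≠ value ∧ c ≠ 0 then 1 else 0) row s := by
    rw [PySem.List.pyGetD_natCast]
    exact pv_pl_getD _ _ _ (by omega)
  simp only [hA, hB1, hB2, hB3, hB4]
  split_ifs <;> ring

theorem pv_main : ∀ (board : List (List Int)) (value : Int),
    get_horizontal_heuristic board value = get_horizontal_heuristic_alt board value := by
  intro board value
  unfold get_horizontal_heuristic get_horizontal_heuristic_alt
  refine PySem.List.foldl_congr_mem _ _ _ _ ?_
  intro hv row _
  exact pv_row_eq value row hv

-- ===== VERDICT (by name: the statement is the Claim_ definition above) =====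
theorem get_horizontal_heuristic_spec : Claim_equal_get_horizontal_heuristic := by
  intro board value _
  unfold Spec_get_horizontal_heuristic
  exact pv_main board value
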